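-- pv_equiv track=rewrite | github.com/msio900/coding_test | programmers_practice/2_2_stack_queue_4.py | solution
-- ===== SOURCE A (Python) =====
-- def solution(prices):
--
--     answer = [0] * len(prices)
--     stack = []
--     for i in range(len(prices)):
--         if len(stack) != 0:
--             for j in range(len(stack)):
--                 if prices[i] < prices[stack[-1]]:
--                     tp = stack.pop()
--                     answer[tp] = i - tp
--                 else:
--                     break
--         stack.append(i)
--
--     for k in stack:
--         answer[k] = len(answer) - k - 1
--
--     return answer
-- ===== SOURCE B (Python) =====
-- def solution(prices):
--     n = len(prices)
--     answer = []
--     for i in range(n):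
--         cnt = n - 1 - i
--         for j in range(i + 1, n):
--             if prices[j] < prices[i]:
--                 cnt = j - i
--                 break
--         answer.append(cnt)
--     return answer
-- ===== Notes on version B (the rewrite author's own statement) =====
-- stated objective: simpler
-- what changed: Replaces the monotonic-stack single pass (with a deferred fix-up loop over the leftover stack) by a direct nested forward scan that fills each answer[i] in place.
import Mathlib
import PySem

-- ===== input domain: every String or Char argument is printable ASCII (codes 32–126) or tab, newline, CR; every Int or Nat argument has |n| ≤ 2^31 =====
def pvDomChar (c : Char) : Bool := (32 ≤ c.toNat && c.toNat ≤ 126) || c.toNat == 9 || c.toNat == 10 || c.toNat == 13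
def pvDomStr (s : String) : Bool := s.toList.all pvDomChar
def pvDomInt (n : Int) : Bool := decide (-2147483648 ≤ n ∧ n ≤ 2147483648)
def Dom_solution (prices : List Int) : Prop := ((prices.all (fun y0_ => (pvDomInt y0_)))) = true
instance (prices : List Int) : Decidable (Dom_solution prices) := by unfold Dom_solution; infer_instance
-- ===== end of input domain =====

-- B replaces A's monotonic-stack pass (plus fix-up loop) by a direct nested forward scan; objective: simpler, same results.

-- ===== PORT A =====
-- stack is represented top-at-head (Python's stack[-1] = head, pop = tail, append = cons).
-- Python's inner 'for j in range(len(stack))' with pop/break is a bounded loop: fuel = len(stack).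
def popLoop (prices : List Int) (i : Nat) : Nat → List Int → List Nat → List Int × List Nat
  | 0, answer, stack => (answer, stack)
  | _ + 1, answer, stack =>
    match stack with
    | [] => (answer, [])
    | tp :: rest =>
      if prices.getD i 0 < prices.getD tp 0 then
        popLoop prices i rest.length (answer.set tp ((i : Int) - (tp : Int))) rest
      else (answer, tp :: rest)

def solution (prices : List Int) : List Int :=
  let n := prices.length
  let st := (List.range n).foldl
    (fun (s : List Int × List Nat) i =>
      let s' := popLoop prices i s.2.length s.1 s.2
      (s'.1, i :: s'.2))
    (List.replicate n 0, [])
  -- Python's 'for k in stack' runs bottom-to-top, i.e. over the reverse of our head-at-top list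
  st.2.reverse.foldl (fun answer k => answer.set k ((n : Int) - (k : Int) - 1)) st.1

-- ===== PORT B =====
-- inner 'for j in range(i+1, n): if prices[j] < prices[i]: cnt = j - i; break' with default n-1-i
def scanFrom (prices : List Int) (i j n : Nat) : Int :=
  if j < n then
    (if prices.getD j 0 < prices.getD i 0 then (j : Int) - (i : Int)
     else scanFrom prices i (j + 1) n)
  else (n : Int) - 1 - (i : Int)
termination_by n - j

def solution_alt (prices : List Int) : List Int :=
  (List.range prices.length).map (fun i => scanFrom prices i (i + 1) prices.length)

-- ===== PRECONDITION & SPEC =====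
def Spec_solution (prices : List Int) (out : List Int) : Prop := out = solution_alt prices
instance (prices : List Int) (out : List Int) : Decidable (Spec_solution prices out) := by unfold Spec_solution; infer_instance

-- ===== CLAIM (what is proved, stated in full; the proofs are below) =====
def Claim_equal_solution : Prop := ∀ (prices : List Int), Dom_solution prices → Spec_solution prices (solution prices)

-- ===== LEMMAS AND PROOFS =====

-- first index r with j ≤ r < t and prices[r] < prices[k], if any
def fscan (prices : List Int) (k j t : Nat) : Option Nat :=
  if j < t then
    (if prices.getD j 0 < prices.getD k 0 then some j
     else fscan prices k (j + 1) t)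
  else none
termination_by t - j

lemma fscan_ge (prices : List Int) (k j t : Nat) (h : t ≤ j) :
    fscan prices k j t = none := by
  rw [fscan]; simp [Nat.not_lt.mpr h]

lemma fscan_none_iff (prices : List Int) (k t : Nat) : ∀ j,
    (fscan prices k j t = none ↔ ∀ m, j ≤ m → m < t → ¬ (prices.getD m 0 < prices.getD k 0)) := by
  intro j
  induction hd : t - j using Nat.strong_induction_on generalizing j with
  | _ d ih =>
    by_cases hj : j < t
    · rw [fscan]
      simp only [hj, if_true]
      by_cases hc : prices.getD j 0 < prices.getD k 0
      · simp only [hc, if_true]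
        constructor
        · intro h; cases h
        · intro h; exact absurd hc (h j le_rfl hj)
      · simp only [hc, if_false]
        rw [ih (t - (j + 1)) (by omega) (j + 1) rfl]
        constructor
        · intro h m hm hmt
          rcases Nat.eq_or_lt_of_le hm with rfl | hlt
          · exact hc
          · exact h m hlt hmt
        · intro h m hm hmt; exact h m (by omega) hmt
    · rw [fscan_ge prices k j t (by omega)]
      constructor
      · intro _ m hm hmt; omega
      · intro _; rfl

lemma fscan_succ (prices : List Int) (k t : Nat) : ∀ j, j ≤ t →
    fscan prices k j (t + 1) =
      (match fscan prices k j t with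
       | some r => some r
       | none => if prices.getD t 0 < prices.getD k 0 then some t else none) := by
  intro j
  induction hd : t - j using Nat.strong_induction_on generalizing j with
  | _ d ih =>
    intro hj
    by_cases hlt : j < t
    · conv_lhs => rw [fscan]
      simp only [show j < t + 1 by omega, if_true]
      by_cases hc : prices.getD j 0 < prices.getD k 0
      · conv_rhs => rw [fscan]
        simp [-List.getD_eq_getElem?_getD, hlt, hc]
      · simp only [hc, if_false]
        rw [ih (t - (j + 1)) (by omega) (j + 1) rfl (by omega)]
        conv_rhs => rw [fscan]
        simp [-List.getD_eq_getElem?_getD, hlt, hc]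
    · have hj' : j = t := by omega
      subst hj'
      rw [fscan_ge prices k j j le_rfl]
      rw [fscan]
      simp only [Nat.lt_succ_self, if_true, fscan_ge prices k (j + 1) (j + 1) le_rfl]

lemma scanFrom_fscan (prices : List Int) (i n : Nat) : ∀ j,
    scanFrom prices i j n =
      (match fscan prices i j n with
       | some r => (r : Int) - (i : Int)
       | none => (n : Int) - 1 - (i : Int)) := by
  intro j
  induction hd : n - j using Nat.strong_induction_on generalizing j with
  | _ d ih =>
    by_cases hj : j < n
    · rw [scanFrom, fscan]
      simp only [hj, if_true]
      by_cases hc : prices.getD j 0 < prices.getD i 0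
      · simp [-List.getD_eq_getElem?_getD, hc]
      · simp only [hc, if_false]
        exact ih (n - (j + 1)) (by omega) (j + 1) rfl
    · rw [scanFrom, fscan_ge prices i j n (by omega)]
      simp [hj]

-- intermediate answer value: first-drop distance if the drop happened before time t, else 0
def F (prices : List Int) (t k : Nat) : Int :=
  match fscan prices k (k + 1) t with
  | some j => (j : Int) - (k : Int)
  | none => 0

def Aspec (prices : List Int) (t : Nat) : List Int :=
  (List.range prices.length).map (F prices t)

def Sspec (prices : List Int) (t : Nat) : List Nat :=
  ((List.range t).reverse).filter (fun k => (fscan prices k (k + 1) t).isNone)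

lemma mem_Sspec (prices : List Int) (t k : Nat) :
    k ∈ Sspec prices t ↔ k < t ∧ fscan prices k (k + 1) t = none := by
  simp [Sspec, List.mem_filter, Option.isNone_iff_eq_none]

lemma Sspec_nodup (prices : List Int) (t : Nat) : (Sspec prices t).Nodup := by
  exact (List.nodup_reverse.mpr List.nodup_range).filter _

lemma Sspec_pairwise (prices : List Int) (t : Nat) :
    (Sspec prices t).Pairwise (fun a b => prices.getD b 0 ≤ prices.getD a 0) := by
  have hgt : (Sspec prices t).Pairwise (fun a b => b < a) := by
    exact (List.pairwise_reverse.mpr (List.pairwise_lt_range)).filter _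
  refine hgt.imp_of_mem ?_
  intro a b ha hb hba
  rw [mem_Sspec] at ha hb
  have := (fscan_none_iff prices b t (b + 1)).mp hb.2 a (by omega) ha.1
  omega

lemma length_foldl_set (g : Nat → Int) : ∀ (l : List Nat) (ans : List Int),
    (l.foldl (fun a k => a.set k (g k)) ans).length = ans.length := by
  intro l
  induction l with
  | nil => intro ans; rfl
  | cons k rest ih =>
    intro ans
    simp only [List.foldl_cons]
    rw [ih, List.length_set]

lemma getD_foldl_set_notmem (g : Nat → Int) : ∀ (l : List Nat) (ans : List Int) (m : Nat),
    m ∉ l → (l.foldl (fun a k => a.set k (g k)) ans).getD m 0 = ans.getD m 0 := by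
  intro l
  induction l with
  | nil => intro ans m _; rfl
  | cons k rest ih =>
    intro ans m hm
    simp only [List.mem_cons, not_or] at hm
    simp only [List.foldl_cons]
    rw [ih _ _ hm.2]
    simp [List.getD, List.getElem?_set_ne (Ne.symm hm.1)]

lemma getD_foldl_set_mem (g : Nat → Int) : ∀ (l : List Nat) (ans : List Int) (m : Nat),
    l.Nodup → m ∈ l → m < ans.length →
    (l.foldl (fun a k => a.set k (g k)) ans).getD m 0 = g m := by
  intro l
  induction l with
  | nil => intro ans m _ hm; cases hm
  | cons k rest ih =>
    intro ans m hnd hm hlen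
    simp only [List.foldl_cons]
    rcases List.mem_cons.mp hm with rfl | hmr
    · have hk : m ∉ rest := (List.nodup_cons.mp hnd).1
      rw [getD_foldl_set_notmem g rest _ m hk]
      simp [List.getD, hlen]
    · exact ih _ _ (List.nodup_cons.mp hnd).2 hmr (by rwa [List.length_set])

lemma popLoop_spec (prices : List Int) (i : Nat) : ∀ (stack : List Nat) (answer : List Int),
    stack.Pairwise (fun a b => prices.getD b 0 ≤ prices.getD a 0) →
    popLoop prices i stack.length answer stack =
      ((stack.filter (fun k => decide (prices.getD i 0 < prices.getD k 0))).foldl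
         (fun a k => a.set k ((i : Int) - (k : Int))) answer,
       stack.filter (fun k => !decide (prices.getD i 0 < prices.getD k 0))) := by
  intro stack
  induction stack with
  | nil => intro answer _; rfl
  | cons tp rest ih =>
    intro answer hpw
    simp only [List.length_cons, popLoop]
    by_cases hc : prices.getD i 0 < prices.getD tp 0
    · rw [if_pos hc, ih _ (List.pairwise_cons.mp hpw).2, List.filter_cons, List.filter_cons]
      simp only [List.getD_eq_getElem?_getD] at hc
      simp [hc]
    · rw [if_neg hc]
      have hall : ∀ b ∈ rest, ¬ (prices.getD i 0 < prices.getD b 0) := by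
        intro b hb
        have := (List.pairwise_cons.mp hpw).1 b hb
        omega
      have h1 : rest.filter (fun k => decide (prices.getD i 0 < prices.getD k 0)) = [] := by
        rw [List.filter_eq_nil_iff]
        intro b hb hdec
        exact hall b hb (of_decide_eq_true hdec)
      have h2 : rest.filter (fun k => !decide (prices.getD i 0 < prices.getD k 0)) = rest := by
        rw [List.filter_eq_self]
        intro b hb
        simp only [Bool.not_eq_true', decide_eq_false_iff_not]
        exact hall b hb
      rw [List.filter_cons, List.filter_cons]
      simp only [List.getD_eq_getElem?_getD] at hc h1 h2
      simp [hc, h1, h2]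

lemma length_Aspec (prices : List Int) (t : Nat) : (Aspec prices t).length = prices.length := by
  simp [Aspec]

lemma Aspec_getD (prices : List Int) (t m : Nat) (h : m < prices.length) :
    (Aspec prices t).getD m 0 = F prices t m := by
  rw [List.getD_eq_getElem _ _ (by rw [length_Aspec]; exact h)]
  simp [Aspec]

lemma Aspec_zero (prices : List Int) : List.replicate prices.length 0 = Aspec prices 0 := by
  have : ∀ k, F prices 0 k = 0 := by
    intro k
    unfold F
    rw [fscan_ge prices k (k + 1) 0 (by omega)]
  apply List.ext_getElem
  · simp [length_Aspec]
  · intro m h1 h2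
    simp [Aspec, this]

lemma answer_step (prices : List Int) (t : Nat) (_h : t + 1 ≤ prices.length) :
    ((Sspec prices t).filter (fun k => decide (prices.getD t 0 < prices.getD k 0))).foldl
      (fun a k => a.set k ((t : Int) - (k : Int))) (Aspec prices t) = Aspec prices (t + 1) := by
  apply List.ext_getElem
  · rw [length_foldl_set, length_Aspec, length_Aspec]
  · intro m h1 h2
    rw [length_foldl_set, length_Aspec] at h1
    rw [← List.getD_eq_getElem _ 0 h2, ← List.getD_eq_getElem _ 0 ((length_foldl_set _ _ _).symm ▸ (length_Aspec prices t).symm ▸ h1)]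
    rw [Aspec_getD prices (t + 1) m h1]
    by_cases hmem : m ∈ (Sspec prices t).filter (fun k => decide (prices.getD t 0 < prices.getD k 0))
    · have hm' := List.mem_filter.mp hmem
      have hS := (mem_Sspec prices t m).mp hm'.1
      have hc : prices.getD t 0 < prices.getD m 0 := of_decide_eq_true hm'.2
      rw [getD_foldl_set_mem _ _ _ _ ((Sspec_nodup prices t).filter _) hmem
          (by rw [length_Aspec]; omega)]
      unfold F
      rw [fscan_succ prices m t (m + 1) (by omega), hS.2]
      simp only [List.getD_eq_getElem?_getD] at hc
      simp [hc]
    · rw [getD_foldl_set_notmem _ _ _ _ hmem, Aspec_getD prices t m h1]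
      unfold F
      by_cases hmt : m < t
      · rw [fscan_succ prices m t (m + 1) (by omega)]
        cases hf : fscan prices m (m + 1) t with
        | some r => simp
        | none =>
          have hmS : m ∈ Sspec prices t := (mem_Sspec prices t m).mpr ⟨hmt, hf⟩
          have hnc : ¬ (prices.getD t 0 < prices.getD m 0) := by
            intro hcon
            exact hmem (List.mem_filter.mpr ⟨hmS, decide_eq_true hcon⟩)
          simp only [List.getD_eq_getElem?_getD] at hnc
          simp [hnc]
      · rw [fscan_ge prices m (m + 1) t (by omega), fscan_ge prices m (m + 1) (t + 1) (by omega)]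

lemma stack_step (prices : List Int) (t : Nat) :
    t :: (Sspec prices t).filter (fun k => !decide (prices.getD t 0 < prices.getD k 0)) =
      Sspec prices (t + 1) := by
  unfold Sspec
  rw [List.range_succ, List.reverse_append, List.filter_filter]
  simp only [List.reverse_singleton, List.singleton_append, List.filter_cons]
  rw [fscan_ge prices t (t + 1) (t + 1) le_rfl]
  simp only [Option.isNone_none, if_true]
  congr 1
  apply List.filter_congr
  intro k hk
  have hkt : k < t := List.mem_range.mp (List.mem_reverse.mp hk)
  rw [fscan_succ prices k t (k + 1) (by omega)]
  cases hf : fscan prices k (k + 1) t with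
  | some r => simp
  | none =>
    split_ifs with hc
    · simpa using hc
    · simpa using not_lt.mp hc

lemma loop_inv (prices : List Int) : ∀ t, t ≤ prices.length →
    (List.range t).foldl
      (fun (s : List Int × List Nat) i =>
        ((popLoop prices i s.2.length s.1 s.2).1, i :: (popLoop prices i s.2.length s.1 s.2).2))
      (List.replicate prices.length 0, []) = (Aspec prices t, Sspec prices t) := by
  intro t
  induction t with
  | zero =>
    intro _
    simp only [List.range_zero, List.foldl_nil]
    rw [Aspec_zero]
    simp [Sspec]
  | succ t ih =>
    intro h
    rw [List.range_succ, List.foldl_append, ih (by omega), List.foldl_cons, List.foldl_nil]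
    simp only
    rw [popLoop_spec prices t (Sspec prices t) (Aspec prices t) (Sspec_pairwise prices t)]
    simp only
    rw [answer_step prices t h, stack_step prices t]

lemma final_pass (prices : List Int) :
    (Sspec prices prices.length).reverse.foldl
      (fun answer k => answer.set k ((prices.length : Int) - (k : Int) - 1))
      (Aspec prices prices.length) = solution_alt prices := by
  apply List.ext_getElem
  · rw [length_foldl_set, length_Aspec]
    simp [solution_alt]
  · intro m h1 h2
    rw [length_foldl_set, length_Aspec] at h1
    rw [← List.getD_eq_getElem _ 0 h2, ← List.getD_eq_getElem _ 0 ((length_foldl_set _ _ _).symm ▸ (length_Aspec prices prices.length).symm ▸ h1)]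
    have hrhs : (solution_alt prices).getD m 0 = scanFrom prices m (m + 1) prices.length := by
      rw [List.getD_eq_getElem _ 0 (by simpa [solution_alt] using h1)]
      simp [solution_alt]
    rw [hrhs, scanFrom_fscan prices m prices.length (m + 1)]
    by_cases hmem : m ∈ Sspec prices prices.length
    · rw [getD_foldl_set_mem _ _ _ _ (List.nodup_reverse.mpr (Sspec_nodup prices _))
          (List.mem_reverse.mpr hmem) (by rw [length_Aspec]; omega)]
      rw [((mem_Sspec prices prices.length m).mp hmem).2]
      simp
      ring
    · rw [getD_foldl_set_notmem _ _ _ _ (fun hc => hmem (List.mem_reverse.mp hc)),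
          Aspec_getD prices prices.length m h1]
      unfold F
      cases hf : fscan prices m (m + 1) prices.length with
      | some r => simp
      | none => exact absurd ((mem_Sspec prices prices.length m).mpr ⟨h1, hf⟩) hmem

-- ===== VERDICT (by name: the statement is the Claim_ definition above) =====
theorem solution_spec : Claim_equal_solution := by
  intro prices _
  unfold Spec_solution
  simp only [solution]
  rw [loop_inv prices prices.length le_rfl]
  exact final_pass prices
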